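-- pv_equiv track=rewrite | github.com/Isaiasfelipe7/DOT | LISTA 4/Lista4_q10.py | maior_soma
-- ===== SOURCE A (Python) =====
-- def maior_soma(lista):
--     dic = {}
--     if len(lista) == 0:
--         return Exception
--
--     for num in lista:
--         if type(num) != int:
--             return Exception
--         if num not in dic:
--             dic[num] = 1
--         else:
--             dic[num] += 1
--
--     soma = 0
--     for num in dic:
--         if dic[num] > 1:
--             if dic[num] * num > soma:
--                 soma = dic[num] * num
--     return soma
-- ===== SOURCE B (Python) =====
-- def maior_soma(lista):
--     if len(lista) == 0:
--         return Exception
--     for num in lista: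
--         if type(num) != int:
--             return Exception
--     s = sorted(lista)
--     best = 0
--     i = 0
--     while i < len(s):
--         j = i + 1
--         while j < len(s) and s[j] == s[i]:
--             j += 1
--         run = j - i
--         if run > 1 and run * s[i] > best:
--             best = run * s[i]
--         i = j
--     return best
-- ===== Notes on version B (the rewrite author's own statement) =====
-- stated objective: alternative
-- what changed: B replaces A's counting dict and dict-iteration max by sort-then-scan: it sorts a copy of the list and walks it once, grouping maximal runs of equal consecutive values and keeping the max run*value over runs longer than 1.
import Mathlib
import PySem

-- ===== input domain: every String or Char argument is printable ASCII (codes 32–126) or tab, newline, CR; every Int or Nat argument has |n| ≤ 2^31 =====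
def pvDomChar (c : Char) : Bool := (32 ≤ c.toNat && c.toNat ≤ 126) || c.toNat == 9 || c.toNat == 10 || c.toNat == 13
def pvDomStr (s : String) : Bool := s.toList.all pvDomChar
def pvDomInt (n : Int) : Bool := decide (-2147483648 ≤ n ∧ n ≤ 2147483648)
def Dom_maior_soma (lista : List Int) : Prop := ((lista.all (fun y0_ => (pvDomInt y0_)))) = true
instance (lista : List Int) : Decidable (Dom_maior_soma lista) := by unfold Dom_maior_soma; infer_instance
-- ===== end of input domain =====

-- B replaces A's counting dict by sort-then-scan over maximal runs of equal consecutive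
-- values (alternative algorithm, no speed claim); B sorts a copy, the argument is not mutated.


-- ===== PORT A =====
-- Literal port of A. On the empty list the Python returns the class `Exception` (not an int);
-- that input is excluded by Pre_maior_soma, the `0` written there is never claimed about.
-- A's `type(num) != int` guard can never fire on a `List Int` argument, so it has no Lean code.
def maior_soma (lista : List Int) : Int :=
  if lista.length = 0 then 0
  else
    let dic : PySem.Dict Int Int :=
      lista.foldl (fun d num =>
        if !(d.contains num) then d.insert num 1
        else d.insert num (d.getD num 0 + 1)) PySem.Dict.empty
    dic.keys.foldl (fun soma num =>
      if dic.getD num 0 > 1 then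
        if dic.getD num 0 * num > soma then dic.getD num 0 * num else soma
      else soma) 0

-- ===== PORT B =====
-- Port of Source B's outer while loop: each iteration consumes one maximal run of equal values
-- from the front of the sorted list (the inner `while s[j] == s[i]` scan is the takeWhile;
-- advancing i to j is the dropWhile), updating the running maximum `best`.
def scanRuns (s : List Int) (best : Int) : Int :=
  match s with
  | [] => best
  | v :: rest =>
      let run : Int := 1 + (rest.takeWhile (fun x => x == v)).length
      let best' := if run > 1 ∧ run * v > best then run * v else best
      scanRuns (rest.dropWhile (fun x => x == v)) best'
termination_by s.length
decreasing_by
  simp only [List.length_cons]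
  exact Nat.lt_succ_of_le (List.length_dropWhile_le _ _)

-- Source B: same empty guard (Exception, excluded by Pre_), then sorted(lista) and the run scan.
def maior_soma_alt (lista : List Int) : Int :=
  if lista.length = 0 then 0
  else scanRuns (PySem.List.sorted lista (fun x => x) false) 0

-- ===== PRECONDITION & SPEC =====
-- Pre_ excludes only the empty list, on which A (and B) return the class `Exception`,
-- which is not a value of the declared Int return type.
def Pre_maior_soma (lista : List Int) : Prop := lista ≠ []
instance (lista : List Int) : Decidable (Pre_maior_soma lista) := by unfold Pre_maior_soma; infer_instance
def pvWitness_maior_soma : List Int := ([1, 2, 2, -3])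

def Spec_maior_soma (lista : List Int) (out : Int) : Prop := out = maior_soma_alt lista
instance (lista : List Int) (out : Int) : Decidable (Spec_maior_soma lista out) := by unfold Spec_maior_soma; infer_instance

-- ===== CLAIM (what is proved, stated in full; the proofs are below) =====
def Claim_equal_maior_soma : Prop := ∀ (lista : List Int), Dom_maior_soma lista → Pre_maior_soma lista → Spec_maior_soma lista (maior_soma lista)

-- ===== LEMMAS AND PROOFS =====

-- The per-value step shared by both programs: conditionally raise the running maximum
-- to count*v, with counts taken in the list L.
def bstep (L : List Int) (soma v : Int) : Int :=
  if (L.count v : Int) > 1 then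
    if (L.count v : Int) * v > soma then (L.count v : Int) * v else soma
  else soma

theorem bstep_lcomm (L : List Int) (b x y : Int) :
    bstep L (bstep L b x) y = bstep L (bstep L b y) x := by
  unfold bstep
  generalize ((L.count x : Int) * x) = kx
  generalize ((L.count y : Int) * y) = ky
  split_ifs <;> omega

-- A's dict-building loop is collections.Counter(lista).
theorem maior_soma_dict_eq_counter (lista : List Int) :
    lista.foldl (fun d num =>
        if !(d.contains num) then d.insert num 1
        else d.insert num (d.getD num 0 + 1)) PySem.Dict.empty
      = PySem.Dict.counter lista := by
  rw [← PySem.Dict.foldl_insert_getD_add_one_eq_counter]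
  apply PySem.List.foldl_congr_mem
  intro acc x _
  by_cases h : acc.contains x = true
  · simp [h]
  · simp only [Bool.not_eq_true] at h
    simp [h, PySem.Dict.getD_of_not_contains acc 0 h]

-- in a sorted list whose elements are all ≥ v, v does not survive dropWhile (== v)
theorem not_mem_dropWhile_beq (v : Int) :
    ∀ (l : List Int), l.Pairwise (· ≤ ·) → (∀ x ∈ l, v ≤ x) →
      v ∉ l.dropWhile (fun x => x == v) := by
  intro l
  induction l with
  | nil => simp
  | cons x t ih =>
    intro hp hge
    by_cases hx : x = v
    · subst hx
      simpa [List.dropWhile_cons] using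
        ih (List.Pairwise.of_cons hp) (fun y hy => hge y (List.mem_cons_of_mem _ hy))
    · have hxv : (x == v) = false := by simp [hx]
      simp only [List.dropWhile_cons, hxv, Bool.false_eq_true, if_false]
      intro hmem
      have hvlt : v < x := lt_of_le_of_ne (hge x (List.mem_cons_self)) (fun h => hx h.symm)
      rcases List.mem_cons.mp hmem with h | h
      · omega
      · have := (List.pairwise_cons.mp hp).1 v h
        omega

-- B's run scan over a sorted list is the fold of bstep over its distinct values.
theorem scanRuns_eq_fold_aux (n : Nat) :
    ∀ (s : List Int), s.length ≤ n → s.Pairwise (· ≤ ·) → ∀ best,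
      scanRuns s best = (PySem.Set.ofList s).foldl (bstep s) best := by
  induction n with
  | zero =>
    intro s hlen _ best
    have : s = [] := List.length_eq_zero_iff.mp (Nat.le_zero.mp hlen)
    subst this
    simp [scanRuns, PySem.Set.ofList]
  | succ n ih =>
    intro s hlen hp best
    match s with
    | [] => simp [scanRuns, PySem.Set.ofList]
    | v :: rest =>
      have hge : ∀ x ∈ rest, v ≤ x := (List.pairwise_cons.mp hp).1
      have hpr : rest.Pairwise (· ≤ ·) := List.Pairwise.of_cons hp
      set t := rest.takeWhile (fun x => x == v) with ht
      set d := rest.dropWhile (fun x => x == v) with hd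
      have htv : ∀ x ∈ t, x = v := fun x hx => by
        have := List.mem_takeWhile_imp hx; simpa using this
      have hvd : v ∉ d := not_mem_dropWhile_beq v rest hpr hge
      have hpd : d.Pairwise (· ≤ ·) := hpr.sublist (List.dropWhile_sublist _)
      have hsplit : t ++ d = rest := List.takeWhile_append_dropWhile
      have hlend : d.length ≤ n := by
        have h1 : d.length ≤ rest.length := List.length_dropWhile_le _ _
        simp only [List.length_cons] at hlen; omega
      have hct : t.count v = t.length := List.count_eq_length.mpr (fun b hb => (htv b hb).symm)
      have hcd0 : d.count v = 0 := List.count_eq_zero.mpr hvd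
      have hcv : (v :: rest).count v = 1 + t.length := by
        rw [List.count_cons_self, ← hsplit, List.count_append, hct, hcd0]; omega
      have hcw : ∀ w ∈ d, (v :: rest).count w = d.count w := by
        intro w hw
        have hwv : w ≠ v := fun h => hvd (h ▸ hw)
        have htw : t.count w = 0 := List.count_eq_zero.mpr (fun h => hwv (htv w h))
        rw [List.count_cons_of_ne (fun h => hwv h.symm), ← hsplit, List.count_append, htw]
        omega
      rw [scanRuns]
      simp only [← ht, ← hd]
      have hbest' : (if (1 + (t.length : Int)) > 1 ∧ (1 + (t.length : Int)) * v > best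
              then (1 + (t.length : Int)) * v else best) = bstep (v :: rest) best v := by
        unfold bstep
        rw [hcv]
        push_cast
        generalize ((1 + (t.length : Int)) * v) = k
        split_ifs <;> first | rfl | omega
      rw [hbest']
      rw [ih d hlend hpd (bstep (v :: rest) best v)]
      have hcongr : (PySem.Set.ofList d).foldl (bstep d) (bstep (v :: rest) best v)
          = (PySem.Set.ofList d).foldl (bstep (v :: rest)) (bstep (v :: rest) best v) := by
        apply PySem.List.foldl_congr_mem
        intro acc x hx
        have hxd : x ∈ d := (PySem.Set.mem_ofList d x).mp hx
        unfold bstep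
        rw [hcw x hxd]
      rw [hcongr]
      have hperm : (PySem.Set.ofList (v :: rest)).Perm (v :: PySem.Set.ofList d) := by
        rw [List.perm_ext_iff_of_nodup (PySem.Set.nodup_ofList _)
          (by
            refine List.nodup_cons.mpr ⟨?_, PySem.Set.nodup_ofList d⟩
            rw [PySem.Set.mem_ofList]; exact hvd)]
        intro a
        rw [PySem.Set.mem_ofList, List.mem_cons, List.mem_cons, PySem.Set.mem_ofList]
        constructor
        · rintro (h | h)
          · exact Or.inl h
          · rw [← hsplit, List.mem_append] at h
            rcases h with h | h
            · exact Or.inl (htv a h)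
            · exact Or.inr h
        · rintro (h | h)
          · exact Or.inl h
          · refine Or.inr ?_
            rw [← hsplit, List.mem_append]; exact Or.inr h
      have := @List.Perm.foldl_eq _ _ (bstep (v :: rest)) _ _
        ⟨fun b x y => bstep_lcomm (v :: rest) b x y⟩ hperm best
      rw [this, List.foldl_cons]

theorem scanRuns_eq_fold (s : List Int) (hp : s.Pairwise (· ≤ ·)) (best : Int) :
    scanRuns s best = (PySem.Set.ofList s).foldl (bstep s) best :=
  scanRuns_eq_fold_aux s.length s le_rfl hp best

-- ===== VERDICT (by name: the statement is the Claim_ definition above) =====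
theorem maior_soma_spec : Claim_equal_maior_soma := by
  intro lista _ hpre
  unfold Spec_maior_soma maior_soma maior_soma_alt
  have hlen : ¬ lista.length = 0 := by simpa using hpre
  simp only [hlen, if_false, maior_soma_dict_eq_counter, PySem.Dict.keys_counter]
  -- A's reporting loop is the fold of bstep lista over the distinct values of lista
  have hA : ∀ (acc : Int) (x : Int), x ∈ PySem.Set.ofList lista →
      (if (PySem.Dict.counter lista).getD x 0 > 1 then
        if (PySem.Dict.counter lista).getD x 0 * x > acc then
          (PySem.Dict.counter lista).getD x 0 * x else acc
      else acc) = bstep lista acc x := by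
    intro acc x _
    simp [bstep, PySem.Dict.getD_counter]
  rw [PySem.List.foldl_congr_mem _ _ (bstep lista) 0 hA]
  -- B's run scan is the fold of bstep over the distinct values of the sorted list
  rw [scanRuns_eq_fold _ (by simpa using PySem.List.sorted_pairwise lista (fun x => x)) 0]
  have hsp : (PySem.List.sorted lista (fun x => x) false).Perm lista :=
    PySem.List.sorted_perm lista (fun x => x) false
  have hB : (PySem.Set.ofList (PySem.List.sorted lista (fun x => x) false)).foldl
        (bstep (PySem.List.sorted lista (fun x => x) false)) 0
      = (PySem.Set.ofList (PySem.List.sorted lista (fun x => x) false)).foldl (bstep lista) 0 := by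
    apply PySem.List.foldl_congr_mem
    intro acc x _
    unfold bstep
    rw [hsp.count_eq x]
  rw [hB]
  have hperm : (PySem.Set.ofList lista).Perm
      (PySem.Set.ofList (PySem.List.sorted lista (fun x => x) false)) := by
    rw [List.perm_ext_iff_of_nodup (PySem.Set.nodup_ofList _) (PySem.Set.nodup_ofList _)]
    intro a
    rw [PySem.Set.mem_ofList, PySem.Set.mem_ofList, PySem.List.mem_sorted]
  exact @List.Perm.foldl_eq _ _ (bstep lista) _ _
    ⟨fun b x y => bstep_lcomm lista b x y⟩ hperm 0
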